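-- pv_equiv track=rewrite | github.com/AnarielSurbito/univer | aois/lab7/func.py | search_match
-- ===== SOURCE A (Python) =====
-- def get_g_l(g, l, a, s, ind, matches):
--     if ind < len(a):
--         g = g or (not a[ind] and s[ind] and not l)
--         l = l or (a[ind] and not s[ind] and not g)
--         if a[ind] == s[ind]:
--             matches += 1
--         ind += 1
--         return get_g_l(g, l, a, s, ind, matches)
--     else:
--         return g, l, matches
--
-- def search_match(arg, arr):
--     ans = 0
--     ind = 0
--     for x in range(len(arr)):
--         _, _, match = get_g_l(0, 0, arg, arr[x], 0, 0)
--         if ans < match: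
--             ans = match
--             ind = x
--     return ans, ind
-- ===== SOURCE B (Python) =====
-- def search_match(arg, arr):
--     counts = [sum(1 for a, s in zip(arg, arr[x]) if a == s) for x in range(len(arr))]
--     if not counts:
--         return 0, 0
--     best = max(counts)
--     return best, counts.index(best)
-- ===== Notes on version B (the rewrite author's own statement) =====
-- stated objective: simpler
-- what changed: Replaced the recursive get_g_l helper (with its dead g/l flags) and the running best-so-far loop by a one-liner: build the list of per-row match counts with zip, then return (max(counts), counts.index(max)).
import Mathlib
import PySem

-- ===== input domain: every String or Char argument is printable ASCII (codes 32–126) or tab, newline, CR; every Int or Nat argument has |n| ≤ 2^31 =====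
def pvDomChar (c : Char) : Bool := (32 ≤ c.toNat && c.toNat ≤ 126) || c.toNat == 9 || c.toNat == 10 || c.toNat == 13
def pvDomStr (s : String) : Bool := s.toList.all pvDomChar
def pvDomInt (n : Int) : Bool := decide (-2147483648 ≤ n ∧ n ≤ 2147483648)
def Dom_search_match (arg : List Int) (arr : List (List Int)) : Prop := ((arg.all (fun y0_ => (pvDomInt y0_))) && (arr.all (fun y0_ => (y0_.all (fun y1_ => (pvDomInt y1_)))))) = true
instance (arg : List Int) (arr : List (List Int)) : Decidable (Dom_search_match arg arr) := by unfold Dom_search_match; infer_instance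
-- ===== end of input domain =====

-- B replaces A's recursive get_g_l helper (whose g/l flags are dead) and the best-so-far loop
-- by: per-row match counts via zip, then (max(counts), counts.index(max)); simpler, not faster.
-- A mutates nothing; equivalence is about the return value.

-- ===== PORT A =====
-- Python's g/l start as int 0 (falsy) and become bools; truthiness-faithfully modelled as Bool.
-- s[ind] out of range (row shorter than arg) is Python's IndexError, modelled as none.
-- structural fuel recursion (fuel = len(a)+1 bounds the remaining steps; a totality
-- guard only, never reached on the entry call get_g_l … 0 …)
def get_g_l_go : Nat → Bool → Bool → List Int → List Int → Int → Int →
    Option (Bool × Bool × Int)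
  | 0, g, l, _, _, _, m0 => some (g, l, m0)
  | fuel + 1, g, l, a, s, ind, m0 =>
    if ind < (a.length : Int) then
      match PySem.List.pyGet? a ind, PySem.List.pyGet? s ind with
      | some ai, some si =>
          let g := g || (decide (ai = 0) && decide (si ≠ 0) && !l)
          let l := l || (decide (ai ≠ 0) && decide (si = 0) && !g)
          let m0 := if ai = si then m0 + 1 else m0
          get_g_l_go fuel g l a s (ind + 1) m0
      | _, _ => none   -- IndexError
    else
      some (g, l, m0)

def get_g_l (g l : Bool) (a s : List Int) (ind : Int) (m0 : Int) :
    Option (Bool × Bool × Int) :=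
  get_g_l_go (a.length + 1) g l a s ind m0

def search_match (arg : List Int) (arr : List (List Int)) : Int × Int :=
  ((List.range arr.length).foldl
    (fun acc x =>
      match acc with
      | none => none
      | some (ans, ind) =>
        match PySem.List.pyGet? arr (x : Int) with
        | none => none
        | some row =>
          match get_g_l false false arg row 0 0 with
          | none => none   -- IndexError propagates
          | some (_, _, m) => some (if ans < m then (m, (x : Int)) else (ans, ind)))
    (some ((0 : Int), (0 : Int)))).getD (0, 0)

-- ===== PORT B =====
def pvCountB (arg row : List Int) : Int :=
  (arg.zip row).foldl (fun c p => if p.1 = p.2 then c + 1 else c) 0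

def search_match_alt (arg : List Int) (arr : List (List Int)) : Int × Int :=
  let counts := (List.range arr.length).map (fun x => pvCountB arg (arr.getD x []))
  if counts.isEmpty then (0, 0)
  else
    match PySem.List.max? counts (fun y => y) with
    | none => (0, 0)
    | some best => (best, ((PySem.List.index? counts best).getD 0 : Nat))

-- ===== PRECONDITION & SPEC =====
-- Pre_ excludes exactly the inputs where A raises IndexError: some row shorter than arg.
def Pre_search_match (arg : List Int) (arr : List (List Int)) : Prop :=
  ∀ row ∈ arr, arg.length ≤ row.length
instance (arg : List Int) (arr : List (List Int)) : Decidable (Pre_search_match arg arr) := by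
  unfold Pre_search_match; infer_instance
def pvWitness_search_match : List Int × List (List Int) := ([1, 0], [[1, 1], [1, 0, 2]])

def Spec_search_match (arg : List Int) (arr : List (List Int)) (out : Int × Int) : Prop :=
  out = search_match_alt arg arr
instance (arg : List Int) (arr : List (List Int)) (out : Int × Int) :
    Decidable (Spec_search_match arg arr out) := by unfold Spec_search_match; infer_instance

-- ===== CLAIM (what is proved, stated in full; the proofs are below) =====
def Claim_equal_search_match : Prop := ∀ (arg : List Int) (arr : List (List Int)),
  Dom_search_match arg arr → Pre_search_match arg arr →
  Spec_search_match arg arr (search_match arg arr)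

-- ===== LEMMAS AND PROOFS =====

-- step-function of B's per-row count
def pvStep (c : Int) (p : Int × Int) : Int := if p.1 = p.2 then c + 1 else c

theorem pvStep_init (l : List (Int × Int)) :
    ∀ c : Int, l.foldl pvStep c = c + l.foldl pvStep 0 := by
  induction l with
  | nil => intro c; simp [List.foldl]
  | cons p t ih =>
    intro c
    simp only [List.foldl]
    rw [ih (pvStep c p), ih (pvStep 0 p)]
    simp only [pvStep]; split_ifs <;> omega

theorem pvCountB_eq_foldl (a r : List Int) :
    pvCountB a r = (a.zip r).foldl pvStep 0 := rfl

theorem pvCountB_nonneg (a r : List Int) : 0 ≤ pvCountB a r := by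
  rw [pvCountB_eq_foldl]
  induction (a.zip r) with
  | nil => simp [List.foldl]
  | cons p t ih =>
    simp only [List.foldl]
    rw [pvStep_init]
    simp only [pvStep]; split_ifs <;> omega

theorem pvCountB_cons (x y : Int) (xs ys : List Int) :
    pvCountB (x :: xs) (y :: ys) = (if x = y then 1 else 0) + pvCountB xs ys := by
  rw [pvCountB_eq_foldl, pvCountB_eq_foldl]
  simp only [List.zip_cons_cons, List.foldl]
  rw [pvStep_init]
  simp only [pvStep]; split_ifs <;> omega

-- characterisation of get_g_l's matches component
theorem get_g_l_go_third : ∀ (fuel n : Nat) (g l : Bool) (m : Int) (a s : List Int),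
    a.length ≤ s.length → a.length - n < fuel →
    ∃ gl : Bool × Bool,
      get_g_l_go fuel g l a s (n : Int) m
        = some (gl.1, gl.2, m + pvCountB (a.drop n) (s.drop n)) := by
  intro fuel
  induction fuel with
  | zero => intro n g l m a s _ hk; omega
  | succ fuel ih =>
    intro n g l m a s hls hk
    by_cases hn : n < a.length
    · have hns : n < s.length := lt_of_lt_of_le hn hls
      obtain ⟨gl, hrec⟩ := ih (n + 1)
        (g || (decide ((a[n] : Int) = 0) && decide ((s[n] : Int) ≠ 0) && !l))
        ((l || (decide ((a[n] : Int) ≠ 0) && decide ((s[n] : Int) = 0) &&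
          !(g || (decide ((a[n] : Int) = 0) && decide ((s[n] : Int) ≠ 0) && !l)))))
        (if (a[n] : Int) = s[n] then m + 1 else m) a s hls (by omega)
      refine ⟨gl, ?_⟩
      rw [get_g_l_go]
      rw [if_pos (by exact_mod_cast hn)]
      rw [PySem.List.pyGet?_natCast a n, PySem.List.pyGet?_natCast s n,
        List.getElem?_eq_getElem hn, List.getElem?_eq_getElem hns]
      simp only []
      have hcast : (n : Int) + 1 = ((n + 1 : Nat) : Int) := by push_cast; ring
      rw [hcast, hrec]
      have hda : a.drop n = a[n] :: a.drop (n + 1) := List.drop_eq_getElem_cons hn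
      have hds : s.drop n = s[n] :: s.drop (n + 1) := List.drop_eq_getElem_cons hns
      rw [hda, hds, pvCountB_cons]
      split_ifs <;> (simp; try ring)
    · refine ⟨(g, l), ?_⟩
      rw [get_g_l_go]
      rw [if_neg (by exact_mod_cast hn)]
      have : a.drop n = [] := List.drop_eq_nil_of_le (by omega)
      simp [this, pvCountB_eq_foldl]

theorem get_g_l_entry (a s : List Int) (h : a.length ≤ s.length) :
    ∃ gl : Bool × Bool,
      get_g_l false false a s 0 0 = some (gl.1, gl.2, pvCountB a s) := by
  obtain ⟨gl, hg⟩ := get_g_l_go_third (a.length + 1) 0 false false 0 a s h (by omega)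
  exact ⟨gl, by simpa using hg⟩

-- A's best-so-far loop, extracted over the list of counts
def loopA : Int × Int → Nat → List Int → Int × Int
  | p, _, [] => p
  | p, x, c :: cs => loopA (if p.1 < c then (c, (x : Int)) else p) (x + 1) cs

theorem fold_range' (arg : List Int) (arr : List (List Int))
    (hpre : ∀ row ∈ arr, arg.length ≤ row.length) :
    ∀ (n k : Nat) (st : Int × Int), k + n ≤ arr.length →
    (List.range' k n).foldl
      (fun acc x =>
        match acc with
        | none => none
        | some (ans, ind) =>
          match PySem.List.pyGet? arr (x : Int) with
          | none => none
          | some row =>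
            match get_g_l false false arg row 0 0 with
            | none => none
            | some (_, _, m) => some (if ans < m then (m, (x : Int)) else (ans, ind)))
      (some st)
    = some (loopA st k ((List.range' k n).map (fun x => pvCountB arg (arr.getD x [])))) := by
  intro n
  induction n with
  | zero => intro k st _; simp [List.range', loopA]
  | succ n ih =>
    intro k st hk
    have hklt : k < arr.length := by omega
    rw [List.range'_succ]
    simp only [List.foldl, List.map]
    obtain ⟨gl, hg0⟩ := get_g_l_entry arg arr[k] (hpre _ (List.getElem_mem hklt))
    have hget : PySem.List.pyGet? arr (k : Int) = some arr[k] := by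
      rw [PySem.List.pyGet?_natCast]; exact List.getElem?_eq_getElem hklt
    have hd : arr.getD k [] = arr[k] := List.getD_eq_getElem arr [] hklt
    simp only [hget, hg0]
    rw [ih (k + 1) _ (by omega)]
    simp [loopA, List.getElem?_eq_getElem hklt]

theorem foldl_max_pull (t : List Int) : ∀ a b : Int, t.foldl max (max a b) = max a (t.foldl max b) := by
  induction t with
  | nil => intro a b; simp [List.foldl]
  | cons x t ih =>
    intro a b
    simp only [List.foldl]
    rw [max_assoc, ih]

theorem loopA_spec : ∀ (cs : List Int) (st : Int × Int) (k : Nat),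
    loopA st k cs =
      match PySem.List.max? cs (fun y => y) with
      | none => st
      | some mx =>
        if st.1 < mx then (mx, ((k + (PySem.List.index? cs mx).getD 0 : Nat) : Int)) else st := by
  intro cs
  induction cs with
  | nil => intro st k; simp [loopA, PySem.List.max?]
  | cons c cs ih =>
    intro st k
    rw [PySem.List.max?_id_cons]
    cases cs with
    | nil =>
      simp only [List.foldl]
      rw [loopA, loopA]
      rcases st with ⟨ans, ind⟩
      by_cases h : ans < c
      · simp [h]
      · simp [h]
    | cons c' t =>
      have hmax : PySem.List.max? (c' :: t) (fun y => y) = some (t.foldl max c') :=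
        PySem.List.max?_id_cons c' t
      set m := t.foldl max c' with hm
      have hM : (c' :: t).foldl max c = max c m := by
        simp only [List.foldl]
        rw [← foldl_max_pull]
      have hmem : m ∈ c' :: t := PySem.List.max?_mem hmax
      have hidx : ∃ j, PySem.List.index? (c' :: t) m = some j := by
        rcases Option.isSome_iff_exists.mp ((PySem.List.index?_isSome_iff _ _).mpr hmem) with ⟨j, hj⟩
        exact ⟨j, hj⟩
      obtain ⟨j, hj⟩ := hidx
      rw [loopA]
      rw [ih _ (k + 1), hmax]
      rcases st with ⟨ans, ind⟩
      rw [hM]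
      dsimp only
      by_cases hcm : c < m
      · have hne : c ≠ m := ne_of_lt hcm
        have hidxc : PySem.List.index? (c :: c' :: t) m = some (j + 1) := by
          rw [PySem.List.index?_cons_of_ne _ hne, hj]; rfl
        have hMm : max c m = m := max_eq_right (le_of_lt hcm)
        rw [hMm, hidxc, hj]
        by_cases h1 : ans < c
        · simp only [if_pos h1]
          have : c < m := hcm
          simp only [if_pos this]
          have : ans < m := lt_trans h1 hcm
          simp only [if_pos this, Option.getD_some]
          congr 1
          push_cast; ring
        · simp only [if_neg h1]
          by_cases h2 : ans < m
          · simp only [if_pos h2, Option.getD_some]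
            congr 1
            push_cast; ring
          · simp only [if_neg h2]
      · have hmc : m ≤ c := le_of_not_gt hcm
        have hMc : max c m = c := max_eq_left hmc
        have hidxc : PySem.List.index? (c :: c' :: t) c = some 0 :=
          PySem.List.index?_cons_self c (c' :: t)
        rw [hMc, hidxc, hj]
        by_cases h1 : ans < c
        · simp only [if_pos h1]
          have : ¬ c < m := hcm
          simp only [if_neg this, Option.getD_some]
          congr 1
        · simp only [if_neg h1]
          have h2 : ¬ ans < m := by omega
          simp only [if_neg h2]


-- ===== VERDICT (by name: the statement is the Claim_ definition above) =====
theorem search_match_spec : Claim_equal_search_match := by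
  intro arg arr _ hpre
  unfold Spec_search_match search_match search_match_alt
  rw [List.range_eq_range']
  rw [fold_range' arg arr hpre arr.length 0 (0, 0) (by omega)]
  rw [Option.getD_some]
  rw [loopA_spec]
  set cs := (List.range' 0 arr.length).map (fun x => pvCountB arg (arr.getD x [])) with hcs
  cases hempty : cs with
  | nil => simp [PySem.List.max?]
  | cons c rest =>
    have hsub : ∀ y ∈ c :: rest, 0 ≤ y := by
      intro y hy
      have hy' : y ∈ cs := by rw [hempty]; exact hy
      rw [hcs] at hy'
      rcases List.mem_map.mp hy' with ⟨x, _, hx⟩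
      rw [← hx]; exact pvCountB_nonneg _ _
    have hmx : PySem.List.max? (c :: rest) (fun y => y) = some (rest.foldl max c) :=
      PySem.List.max?_id_cons c rest
    set mx := rest.foldl max c with hmxdef
    have hmxmem : mx ∈ c :: rest := PySem.List.max?_mem hmx
    have hmx0 : 0 ≤ mx := hsub mx hmxmem
    rw [hmx]
    dsimp only
    by_cases hpos : (0 : Int) < mx
    · simp [hmx, hpos]
    · have hmxz : mx = 0 := by omega
      have hc0 : c = 0 := by
        have h1 : c ≤ mx := by simpa using PySem.List.max?_isMax hmx c (List.mem_cons_self ..)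
        have h2 : 0 ≤ c := hsub c (List.mem_cons_self ..)
        omega
      have hidx : PySem.List.index? (c :: rest) mx = some 0 := by
        rw [hmxz, ← hc0]; exact PySem.List.index?_cons_self c rest
      simp [hc0]
      rw [hc0] at hmx hidx
      rw [hmx]
      dsimp only
      rw [PySem.List.index?_eq_idxOf?] at hidx
      rw [hidx, hmxz]
      simp
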